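-- pv_equiv track=rewrite | github.com/submitanonymous6/gui-response | src/utils_common.py | group_consecutive_taps
-- ===== SOURCE A (Python) =====
-- from typing import List, Dict
--
-- def group_consecutive_taps(tap_frames: List[Dict]) -> List[List[Dict]]:
--     tap_frames.sort(key=lambda f: f['id'])
--     groups = []
--     current_group = [tap_frames[0]]
--
--     for i in range(1, len(tap_frames)):
--         if tap_frames[i]['id'] == tap_frames[i - 1]['id'] + 1:
--             current_group.append(tap_frames[i])
--         else:
--             groups.append(current_group)
--             current_group = [tap_frames[i]]
--     groups.append(current_group)
--     return groups
-- ===== SOURCE B (Python) =====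
-- from typing import List, Dict
--
-- def group_consecutive_taps(tap_frames: List[Dict]) -> List[List[Dict]]:
--     # Build the groups back-to-front: walk the sorted frames in reverse and
--     # either extend the front group (if this frame chains onto its head) or
--     # open a new front group.  Sorts the argument in place, like the original.
--     tap_frames.sort(key=lambda f: f['id'])
--     groups = []
--     for f in reversed(tap_frames):
--         if groups and f['id'] + 1 == groups[0][0]['id']:
--             groups[0].insert(0, f)
--         else:
--             groups.insert(0, [f])
--     return groups
-- ===== Notes on version B (the rewrite author's own statement) =====
-- stated objective: alternative
-- what changed: B builds the groups back-to-front: it walks the sorted frames in reverse and either prepends the frame to the front group (when its id chains onto that group's head) or opens a new front group, instead of A's forward scan with a current_group accumulator and a final flush.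
-- outside the precondition, e.g. on group_consecutive_taps([]): A raises IndexError, B returns []
import Mathlib
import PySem

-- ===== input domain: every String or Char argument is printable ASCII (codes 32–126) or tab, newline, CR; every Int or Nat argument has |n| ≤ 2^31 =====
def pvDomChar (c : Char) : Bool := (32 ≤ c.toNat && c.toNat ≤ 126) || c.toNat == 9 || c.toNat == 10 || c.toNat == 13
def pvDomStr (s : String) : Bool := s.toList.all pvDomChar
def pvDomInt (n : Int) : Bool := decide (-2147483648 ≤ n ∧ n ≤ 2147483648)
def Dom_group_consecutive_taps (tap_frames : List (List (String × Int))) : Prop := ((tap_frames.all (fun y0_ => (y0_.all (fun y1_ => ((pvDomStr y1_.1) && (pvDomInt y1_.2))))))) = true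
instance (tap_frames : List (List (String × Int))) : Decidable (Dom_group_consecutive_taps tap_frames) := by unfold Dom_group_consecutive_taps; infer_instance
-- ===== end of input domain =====

-- B builds the groups back-to-front over the sorted frames instead of A's forward scan
-- with a current_group accumulator (objective: alternative).  Both A and B sort the
-- argument in place; the equivalence proved here is about the return value (the in-place
-- sort effect of A and B is identical anyway).

-- ===== PORT A =====
-- f['id']: first-match lookup; exact under Pre_ (every frame carries the key "id" —
-- a missing key would be a Python KeyError, which Pre_ excludes)
def frameId (f : List (String × Int)) : Int := (List.lookup "id" f).getD 0

-- tap_frames.sort(key=lambda f: f['id'])  (stable, Python's sort)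
def sortById (tap_frames : List (List (String × Int))) : List (List (String × Int)) :=
  PySem.List.sorted tap_frames (fun f => frameId f) false

def group_consecutive_taps (tap_frames : List (List (String × Int))) : List (List (List (String × Int))) :=
  let s := sortById tap_frames
  -- tap_frames[0]: IndexError on the empty list, excluded by Pre_
  let first := (PySem.List.pyGet? s 0).getD []
  let p := (PySem.List.pyRange 1 (s.length : Int) 1).foldl (fun acc i =>
      let fi := (PySem.List.pyGet? s i).getD []
      let fp := (PySem.List.pyGet? s (i - 1)).getD []
      if frameId fi = frameId fp + 1 then (acc.1, acc.2 ++ [fi])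
      else (acc.1 ++ [acc.2], [fi]))
    (([] : List (List (List (String × Int)))), [first])
  p.1 ++ [p.2]

-- ===== PORT B =====
-- the body of B's loop: extend the front group or open a new one
def stepB (groups : List (List (List (String × Int)))) (f : List (String × Int)) :
    List (List (List (String × Int))) :=
  match groups with
  | (g0 :: g) :: gs =>
      if frameId f + 1 = frameId g0 then (f :: g0 :: g) :: gs
      else [f] :: (g0 :: g) :: gs
  | _ => [f] :: groups  -- groups == [] (a group is never empty)

def group_consecutive_taps_alt (tap_frames : List (List (String × Int))) : List (List (List (String × Int))) :=
  let s := sortById tap_frames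
  -- for f in reversed(tap_frames): extend or open the front group
  s.reverse.foldl stepB []

-- ===== PRECONDITION & SPEC =====
-- Pre_ is exactly where the Python A returns: a nonempty list (tap_frames[0] raises
-- IndexError on []) whose every frame has the key "id" (f['id'] raises KeyError otherwise).
def Pre_group_consecutive_taps (tap_frames : List (List (String × Int))) : Prop :=
  tap_frames ≠ [] ∧ ∀ f ∈ tap_frames, (List.lookup "id" f).isSome
instance (tap_frames : List (List (String × Int))) : Decidable (Pre_group_consecutive_taps tap_frames) := by
  unfold Pre_group_consecutive_taps; infer_instance

def pvWitness_group_consecutive_taps : (List (List (String × Int))) :=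
  [[("id", 5)], [("id", 1), ("x", 0)], [("id", 2)]]

def Spec_group_consecutive_taps (tap_frames : List (List (String × Int))) (out : List (List (List (String × Int)))) : Prop := out = group_consecutive_taps_alt tap_frames
instance (tap_frames : List (List (String × Int))) (out : List (List (List (String × Int)))) : Decidable (Spec_group_consecutive_taps tap_frames out) := by unfold Spec_group_consecutive_taps; infer_instance

-- ===== CLAIM (what is proved, stated in full; the proofs are below) =====
def Claim_equal_group_consecutive_taps : Prop := ∀ (tap_frames : List (List (String × Int))), Dom_group_consecutive_taps tap_frames → Pre_group_consecutive_taps tap_frames → Spec_group_consecutive_taps tap_frames (group_consecutive_taps tap_frames)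

-- ===== LEMMAS AND PROOFS =====

-- The common structural grouping of a sorted run: grp x t groups x :: t, where each
-- element joins the current group iff its id is the predecessor's id plus one.
def grp (x : List (String × Int)) : List (List (String × Int)) → List (List (List (String × Int)))
  | [] => [[x]]
  | y :: t =>
      if frameId y = frameId x + 1 then
        match grp y t with
        | (z :: g) :: gs => (x :: z :: g) :: gs
        | _ => [[x]]  -- unreachable (grp_shape)
      else [x] :: grp y t

lemma grp_shape (x : List (String × Int)) (l : List (List (String × Int))) :
    ∃ g gs, grp x l = (x :: g) :: gs := by
  induction l generalizing x with
  | nil => exact ⟨[], [], rfl⟩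
  | cons y t ih =>
    by_cases h : frameId y = frameId x + 1
    · obtain ⟨g, gs, hg⟩ := ih y
      exact ⟨y :: g, gs, by simp [grp, h, hg]⟩
    · exact ⟨[], grp y t, by simp [grp, h]⟩

-- A's loop state, structurally: (completed groups, current group)
def runA (groups : List (List (List (String × Int)))) (cur : List (List (String × Int)))
    (prev : List (String × Int)) :
    List (List (String × Int)) → List (List (List (String × Int))) × List (List (String × Int))
  | [] => (groups, cur)
  | f :: rest =>
      if frameId f = frameId prev + 1 then runA groups (cur ++ [f]) f rest
      else runA (groups ++ [cur]) [f] f rest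

-- A's indexed fold over range(1, len) equals runA on the suffix after the cursor.
lemma Afold (l₂ : List (List (String × Int))) :
    ∀ (l₁ : List (List (String × Int))) (s : List (List (String × Int)))
      (prev : List (String × Int)) (groups : List (List (List (String × Int))))
      (cur : List (List (String × Int))), s = l₁ ++ prev :: l₂ →
    (PySem.List.pyRange ((l₁.length : Int) + 1) (s.length : Int) 1).foldl (fun acc i =>
        let fi := (PySem.List.pyGet? s i).getD []
        let fp := (PySem.List.pyGet? s (i - 1)).getD []
        if frameId fi = frameId fp + 1 then (acc.1, acc.2 ++ [fi])
        else (acc.1 ++ [acc.2], [fi])) (groups, cur)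
      = runA groups cur prev l₂ := by
  induction l₂ with
  | nil =>
    intro l₁ s prev groups cur hs
    have hlen : (s.length : Int) = (l₁.length : Int) + 1 := by simp [hs]
    rw [hlen, PySem.List.pyRange_one_eq_nil (le_refl _)]
    rfl
  | cons f rest ih =>
    intro l₁ s prev groups cur hs
    have hlen : s.length = l₁.length + 2 + rest.length := by simp [hs]; omega
    have hlt : ((l₁.length : Int) + 1) < (s.length : Int) := by rw [hlen]; push_cast; omega
    rw [PySem.List.pyRange_one_cons hlt, List.foldl_cons]
    have hfi : PySem.List.pyGet? s ((l₁.length : Int) + 1) = some f := by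
      have hcast : ((l₁.length : Int) + 1) = ((l₁.length + 1 : Nat) : Int) := by push_cast; ring
      rw [hcast, PySem.List.pyGet?_natCast, hs]
      rw [List.getElem?_append_right (by omega)]
      simp
    have hfp : PySem.List.pyGet? s ((l₁.length : Int) + 1 - 1) = some prev := by
      have hcast : ((l₁.length : Int) + 1 - 1) = ((l₁.length : Nat) : Int) := by ring
      rw [hcast, PySem.List.pyGet?_natCast, hs]
      rw [List.getElem?_append_right (by omega)]
      simp
    simp only [hfi, hfp, Option.getD_some]
    have hidx : ((l₁.length : Int) + 1 + 1) = (((l₁ ++ [prev]).length : Int) + 1) := by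
      simp
    by_cases h : frameId f = frameId prev + 1
    · simp only [if_pos h, runA]
      rw [hidx]
      exact ih (l₁ ++ [prev]) s f groups (cur ++ [f]) (by simp [hs])
    · simp only [if_neg h, runA]
      rw [hidx]
      exact ih (l₁ ++ [prev]) s f (groups ++ [cur]) [f] (by simp [hs])

-- runA, flushed with its current group, equals grp with the head merged into cur.
lemma runA_grp (l : List (List (String × Int))) :
    ∀ (prev : List (String × Int)) (groups : List (List (List (String × Int))))
      (cur g : List (List (String × Int))) (gs : List (List (List (String × Int)))),
      grp prev l = (prev :: g) :: gs →
      (runA groups cur prev l).1 ++ [(runA groups cur prev l).2] = groups ++ (cur ++ g) :: gs := by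
  induction l with
  | nil =>
    intro prev groups cur g gs hg
    simp [grp] at hg
    simp [runA, hg.1, hg.2]
  | cons f rest ih =>
    intro prev groups cur g gs hg
    by_cases h : frameId f = frameId prev + 1
    · obtain ⟨g', gs', hg'⟩ := grp_shape f rest
      rw [grp, if_pos h, hg'] at hg
      obtain ⟨h1, h2⟩ := by simpa using hg
      simp only [runA, if_pos h]
      rw [ih f groups (cur ++ [f]) g' gs' hg']
      simp [h1, h2]
    · rw [grp, if_neg h] at hg
      obtain ⟨g', gs', hg'⟩ := grp_shape f rest
      rw [hg'] at hg
      obtain ⟨h1, h2⟩ := by simpa using hg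
      simp only [runA, if_neg h]
      rw [ih f (groups ++ [cur]) [f] g' gs' hg']
      simp [h1, ← h2]

-- B's reversed fold, read as a foldr, equals grp.
lemma Bfoldr (t : List (List (String × Int))) :
    ∀ (x : List (String × Int)),
    List.foldr (fun f groups => stepB groups f) [] (x :: t) = grp x t := by
  induction t with
  | nil => intro x; rfl
  | cons y t ih =>
    intro x
    obtain ⟨g, gs, hg⟩ := grp_shape y t
    have hy := ih y
    by_cases h : frameId y = frameId x + 1
    · simp only [List.foldr_cons] at hy ⊢
      rw [hy, hg]
      have h' : frameId x + 1 = frameId y := h.symm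
      have hstep : stepB ((y :: g) :: gs) x
          = if frameId x + 1 = frameId y then (x :: y :: g) :: gs else [x] :: (y :: g) :: gs := rfl
      rw [hstep, if_pos h']
      simp only [grp, hg]
      rw [if_pos h]
    · simp only [List.foldr_cons] at hy ⊢
      rw [hy, hg]
      have h' : ¬ frameId x + 1 = frameId y := fun hc => h hc.symm
      have hstep : stepB ((y :: g) :: gs) x
          = if frameId x + 1 = frameId y then (x :: y :: g) :: gs else [x] :: (y :: g) :: gs := rfl
      rw [hstep, if_neg h']
      simp only [grp, hg]
      rw [if_neg h]

-- ===== VERDICT (by name: the statement is the Claim_ definition above) =====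
theorem group_consecutive_taps_spec : Claim_equal_group_consecutive_taps := by
  intro tf _hdom hpre
  obtain ⟨hne, _⟩ := hpre
  unfold Spec_group_consecutive_taps group_consecutive_taps group_consecutive_taps_alt
  have hsne : sortById tf ≠ [] := by
    simpa [sortById, PySem.List.sorted_eq_nil_iff] using hne
  obtain ⟨x, t, hs⟩ := List.exists_cons_of_ne_nil hsne
  obtain ⟨g, gs, hg⟩ := grp_shape x t
  simp only [hs, PySem.List.pyGet?_zero_cons, Option.getD_some]
  have hA := Afold t [] (x :: t) x [] [x] (by simp)
  simp only [List.length_nil, Nat.cast_zero, zero_add] at hA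
  rw [hA, runA_grp t x [] [x] g gs hg]
  rw [List.foldl_reverse, Bfoldr t x, hg]
  simp
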